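-- pv_equiv track=rewrite | github.com/san801219/dep_07.12 | Arrey.py | change_odd_list
-- ===== SOURCE A (Python) =====
-- def found_odd_elements(array:list)->list:
--     """ Find odd elements"""
--     odd_list=sorted([odd for odd in array if odd % 2 !=0])
--     return odd_list
--
-- def change_odd_list(array:list)->list:
--     """ Replace the odd elements at the array on the sorted odd elements """
--     odd_list=found_odd_elements(array)
--     j=0
--     res_list=[]
--     for elem in array:
--         if elem % 2 !=0:
--             elem = odd_list [j]
--             res_list.append(odd_list[j])
--             j+=1
--         else:
--             res_list.append(elem)
--     return res_list
-- ===== SOURCE B (Python) =====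
-- def change_odd_list(array: list) -> list:
--     """Replace odd elements by repeatedly extracting the minimum remaining odd value (selection, no sort)."""
--     odds = [x for x in array if x % 2 != 0]
--     res = []
--     for x in array:
--         if x % 2 != 0:
--             m = min(odds)
--             odds.remove(m)
--             res.append(m)
--         else:
--             res.append(x)
--     return res
-- ===== Notes on version B (the rewrite author's own statement) =====
-- stated objective: alternative
-- what changed: B never sorts: it keeps the multiset of remaining odd values and, at each odd position, extracts its minimum with min()/remove() (selection), instead of A's sorted() list consumed by a running counter.
import Mathlib
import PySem

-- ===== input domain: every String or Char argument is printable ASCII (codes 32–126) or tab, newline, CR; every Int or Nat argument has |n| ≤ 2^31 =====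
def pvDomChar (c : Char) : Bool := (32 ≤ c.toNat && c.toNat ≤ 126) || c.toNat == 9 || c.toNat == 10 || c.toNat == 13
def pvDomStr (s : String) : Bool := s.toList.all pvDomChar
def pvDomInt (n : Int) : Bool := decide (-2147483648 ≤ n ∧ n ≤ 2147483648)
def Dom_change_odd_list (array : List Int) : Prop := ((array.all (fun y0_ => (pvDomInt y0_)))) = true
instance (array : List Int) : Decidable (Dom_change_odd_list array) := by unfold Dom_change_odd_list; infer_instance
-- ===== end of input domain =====

-- B replaces A's sort-then-consume by selection: repeatedly extract min() of the remaining odd multiset ("alternative", same results).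

-- ===== PORT A =====
def found_odd_elements (array : List Int) : List Int :=
  PySem.List.sorted (array.filter (fun odd => PySem.Int.mod odd 2 != 0)) (fun x => x) false

def change_odd_list (array : List Int) : List Int :=
  let odd_list := found_odd_elements array
  -- loop state (j, res_list); odd_list[j] is always in range in A, so getD is exact
  (array.foldl (fun (st : Nat × List Int) elem =>
      if PySem.Int.mod elem 2 != 0 then (st.1 + 1, st.2 ++ [odd_list.getD st.1 0])
      else (st.1, st.2 ++ [elem])) (0, [])).2

-- ===== PORT B =====
def change_odd_list_alt (array : List Int) : List Int :=
  let odds0 := array.filter (fun x => PySem.Int.mod x 2 != 0)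
  -- loop state (odds, res); min(odds)/odds.remove never fail in B (odds is nonempty at each odd
  -- element), so the getD defaults are exact
  (array.foldl (fun (st : List Int × List Int) x =>
      if PySem.Int.mod x 2 != 0 then
        let m := (PySem.List.min? st.1 (fun y => y)).getD 0
        ((PySem.List.remove? st.1 m).getD st.1, st.2 ++ [m])
      else (st.1, st.2 ++ [x])) (odds0, [])).2

-- ===== PRECONDITION & SPEC =====
def Spec_change_odd_list (array : List Int) (out : List Int) : Prop := out = change_odd_list_alt array
instance (array : List Int) (out : List Int) : Decidable (Spec_change_odd_list array out) := by unfold Spec_change_odd_list; infer_instance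

-- ===== CLAIM =====
def Claim_equal_change_odd_list : Prop := ∀ (array : List Int), Dom_change_odd_list array → Spec_change_odd_list array (change_odd_list array)

-- ===== LEMMAS AND PROOFS =====

/-- Reference merge: replace the odd elements of `xs` by successive elements of `ods`. -/
def pvMerge (xs ods : List Int) : List Int :=
  match xs with
  | [] => []
  | x :: xs' =>
    if PySem.Int.mod x 2 != 0 then ods.head?.getD 0 :: pvMerge xs' ods.tail
    else x :: pvMerge xs' ods

/-- A's loop computes `pvMerge` against the suffix of `odd_list` from `j`. -/
theorem pvLoopA (full : List Int) (xs : List Int) :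
    ∀ (j : Nat) (res : List Int) (ods : List Int), full.drop j = ods →
    (xs.foldl (fun (st : Nat × List Int) elem =>
        if PySem.Int.mod elem 2 != 0 then (st.1 + 1, st.2 ++ [full.getD st.1 0])
        else (st.1, st.2 ++ [elem])) (j, res)).2 = res ++ pvMerge xs ods := by
  induction xs with
  | nil => intro j res ods h; simp [pvMerge]
  | cons x xs ih =>
    intro j res ods h
    by_cases hx : (PySem.Int.mod x 2 != 0) = true
    · have hx' : x % 2 = 1 := by simpa using hx
      have hget : full[j]?.getD 0 = ods.head?.getD 0 := by
        rw [← h]; simp [List.head?_drop]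
      have hdrop : full.drop (j + 1) = ods.tail := by
        rw [← h, List.tail_drop]
      simp only [List.foldl_cons, hx, if_true]
      rw [ih (j + 1) (res ++ [full.getD j 0]) ods.tail hdrop]
      simp [pvMerge, hx', hget]
    · have hx' : ¬ x % 2 = 1 := by simpa using hx
      simp only [List.foldl_cons]
      rw [if_neg hx, ih j (res ++ [x]) ods h]
      simp [pvMerge, hx']

/-- B's selection loop computes `pvMerge` against `sorted ods`. -/
theorem pvLoopB (xs : List Int) :
    ∀ (ods res : List Int),
    (xs.foldl (fun (st : List Int × List Int) x =>
        if PySem.Int.mod x 2 != 0 then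
          let m := (PySem.List.min? st.1 (fun y => y)).getD 0
          ((PySem.List.remove? st.1 m).getD st.1, st.2 ++ [m])
        else (st.1, st.2 ++ [x])) (ods, res)).2
      = res ++ pvMerge xs (PySem.List.sorted ods (fun y => y) false) := by
  induction xs with
  | nil => intro ods res; simp [pvMerge]
  | cons x xs ih =>
    intro ods res
    by_cases hx : (PySem.Int.mod x 2 != 0) = true
    · have hx' : x % 2 = 1 := by simpa using hx
      rcases hods : PySem.List.sorted ods (fun y => y) false with _ | ⟨m, t⟩
      · -- ods = []: min? = none, remove? = none; both sides use default 0 and []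
        have h0 : ods = [] := (PySem.List.sorted_eq_nil_iff ods (fun y => y) false).1 hods
        subst h0
        have h1 : (PySem.List.min? ([] : List Int) (fun y => y)).getD 0 = 0 := by
          simp [PySem.List.min?]
        have h2 : (PySem.List.remove? ([] : List Int) 0).getD [] = ([] : List Int) := by
          simp [PySem.List.remove?]
        simp only [List.foldl_cons, hx, if_true, h1, h2]
        rw [ih [] (res ++ [0])]
        simp [pvMerge, hx', hods]
      · -- nonempty: the min value is m, removing it leaves a list whose sorted form is t
        have hmem : m ∈ ods := by
          have := PySem.List.sorted_perm ods (fun y : Int => y) false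
          rw [hods] at this
          exact this.mem_iff.1 (by simp)
        have hne : ods ≠ [] := by rintro rfl; simp [PySem.List.sorted] at hods
        obtain ⟨m', hm'⟩ : ∃ m', PySem.List.min? ods (fun y : Int => y) = some m' := by
          cases h : PySem.List.min? ods (fun y : Int => y) with
          | none => exact absurd ((PySem.List.min?_eq_none_iff ods (fun y : Int => y)).1 h) hne
          | some v => exact ⟨v, rfl⟩
        have hmm : m' = m := by
          have h1 : ∀ y ∈ ods, m' ≤ y := PySem.List.min?_isMin hm'
          have h2 : ∀ y ∈ ods, m ≤ y := PySem.List.key_head_sorted_le ods (fun y : Int => y) hods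
          have hm'mem : m' ∈ ods := PySem.List.min?_mem hm'
          exact le_antisymm (h1 m hmem) (h2 m' hm'mem)
        subst hmm
        have hrm : PySem.List.remove? ods m' = some (ods.erase m') :=
          PySem.List.remove?_eq_some_erase ods m' hmem
        have hsort : PySem.List.sorted (ods.erase m') (fun y => y) false = t := by
          have hperm : (m' :: t).Perm ods := by
            have := PySem.List.sorted_perm ods (fun y : Int => y) false
            rwa [hods] at this
          have hperm2 : ods.Perm (m' :: ods.erase m') := List.perm_cons_erase hmem
          have ht : t.Perm (ods.erase m') := (hperm.trans hperm2).cons_inv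
          have hpw : (m' :: t).Pairwise (fun a b : Int => a ≤ b) := by
            have := PySem.List.sorted_pairwise ods (fun y : Int => y)
            rwa [hods] at this
          exact PySem.List.sorted_id_eq_of_perm_of_pairwise (ods.erase m') t ht (List.Pairwise.of_cons hpw)
        simp only [List.foldl_cons, hx, if_true, hm', Option.getD_some, hrm]
        rw [ih (ods.erase m') (res ++ [m'])]
        simp [pvMerge, hx', hsort]
    · have hx' : ¬ x % 2 = 1 := by simpa using hx
      simp only [List.foldl_cons]
      rw [if_neg hx, ih ods (res ++ [x])]
      simp [pvMerge, hx']

-- ===== VERDICT =====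
theorem change_odd_list_spec : Claim_equal_change_odd_list := by
  intro array _
  show change_odd_list array = change_odd_list_alt array
  simp only [change_odd_list, change_odd_list_alt, found_odd_elements]
  rw [pvLoopA (PySem.List.sorted (array.filter (fun odd => PySem.Int.mod odd 2 != 0)) (fun x => x) false)
      array 0 [] _ rfl]
  rw [pvLoopB array (array.filter (fun x => PySem.Int.mod x 2 != 0)) []]
  simp
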